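-- pv_equiv track=rewrite | github.com/SebastianAcosta2006/PUNTO-2-COMPARACION-ALGORITMOS | ll1_parser.py | ll1_parse
-- ===== SOURCE A (Python) =====
-- def ll1_parse(input_string):
--     stack = ['$', 'S']
--     input_string += '$'
--     i = 0
--
--     table = {
--         ('S', 'a'): ['a', 'S', 'b'],
--         ('S', 'b'): [],
--         ('S', '$'): []
--     }
--
--     while stack:
--         top = stack.pop()
--         current = input_string[i]
--
--         if top == current:
--             i += 1
--         elif (top, current) in table:
--             production = table[(top, current)]
--             for symbol in reversed(production):
--                 stack.append(symbol)
--         else: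
--             return False
--
--     return True
-- ===== SOURCE B (Python) =====
-- def ll1_parse(input_string):
--     # Direct scan for the language the LL(1) table encodes (S -> a S b | eps):
--     # count the leading 'a's, require that many 'b's, then the end marker '$'.
--     s = input_string + '$'
--     n = 0
--     while s[n] == 'a':
--         n += 1
--     i = n
--     for _ in range(n):
--         if s[i] != 'b':
--             return False
--         i += 1
--     return s[i] == '$'
-- ===== Notes on version B (the rewrite author's own statement) =====
-- stated objective: simpler
-- what changed: Replaced the table-driven stack machine (explicit parse stack, parse table, pop/push loop) by a direct two-phase scan: count the leading 'a's, check that many 'b's follow, then the end marker.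
-- intended difference: On inputs of the form a^n S b^n (alone, or extended by a dollar sign and arbitrary trailing text), A returns True because the nonterminal marker 'S' on its stack compares equal to the literal input character 'S'; B returns False, the intended value since 'S' is not a terminal of the grammar a^n b^n. — e.g. on ll1_parse("S"): A returns true, B returns false
import Mathlib
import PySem

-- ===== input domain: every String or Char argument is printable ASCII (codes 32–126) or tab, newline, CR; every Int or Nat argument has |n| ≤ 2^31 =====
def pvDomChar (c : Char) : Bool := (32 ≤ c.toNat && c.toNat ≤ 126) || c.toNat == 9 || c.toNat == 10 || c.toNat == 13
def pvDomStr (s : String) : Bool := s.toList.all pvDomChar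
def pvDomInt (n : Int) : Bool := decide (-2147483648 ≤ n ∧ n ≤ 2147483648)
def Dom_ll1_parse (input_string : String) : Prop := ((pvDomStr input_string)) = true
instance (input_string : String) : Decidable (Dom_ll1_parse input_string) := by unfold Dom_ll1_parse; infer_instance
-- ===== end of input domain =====

-- B replaces A's table-driven stack machine by a direct two-phase scan (count a's, match b's, check '$');
-- on the exceptional inputs a^n S b^n (possibly dollar-extended) A accepts, its nonterminal S matching the character S, while B rejects (stated as D_ below).

-- ===== PORT A =====
-- the while loop of A, fuel-guarded (fuel only makes the recursion total; it is proven sufficient below);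
-- stack is kept head-first (head = Python's stack top); s.getD i '#' stands for input_string[i]
-- (the index is proven in range on every reachable state, so the default '#' is never consulted;
-- Python's local `current = input_string[i]` is written inline as s.getD i '#')
def loopA : Nat → List Char → List Char → Nat → Bool
  | 0, _, _, _ => false
  | f + 1, s, stack, i =>
    match stack with
    | [] => true
    | top :: rest =>
      if top == s.getD i '#' then loopA f s rest (i + 1)
      else if top == 'S' && (s.getD i '#' == 'a' || s.getD i '#' == 'b' || s.getD i '#' == '$') then
        -- (top, current) ∈ table; production ['a','S','b'] is pushed reversed, or the empty production
        if s.getD i '#' == 'a' then loopA f s ('a' :: 'S' :: 'b' :: rest) i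
        else loopA f s rest i
      else false

def ll1_parse (input_string : String) : Bool :=
  let s := input_string.toList ++ ['$']
  loopA (3 * s.length + 3) s ['S', '$'] 0

-- ===== PORT B =====
-- leading-'a' counter: the `while s[n] == 'a'` loop of Source B (the bound check only makes it total;
-- s ends in '$', so the Python loop never runs off the end)
def altCount (s : List Char) (n : Nat) : Nat :=
  if h : n < s.length then (if s[n] = 'a' then altCount s (n + 1) else n) else n
termination_by s.length - n

-- the `for _ in range(n)` b-loop of Source B together with its final `return s[i] == '$'`
def altB : List Char → Nat → Nat → Bool
  | s, i, 0 => s.getD i '#' == '$'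
  | s, i, k + 1 => if s.getD i '#' == 'b' then altB s (i + 1) k else false

def ll1_parse_alt (input_string : String) : Bool :=
  let s := input_string.toList ++ ['$']
  let n := altCount s 0
  altB s n n

-- ===== PRECONDITION & SPEC =====
-- On inputs of the form a^n S b^n (alone, or extended by a dollar sign and arbitrary trailing text),
-- A returns True because the nonterminal marker 'S' on its stack compares equal to the literal input
-- character 'S'; B returns False, the intended value since 'S' is not a terminal of the grammar a^n b^n.
def D_ll1_parse (input_string : String) : Prop :=
  let p := input_string.toList.takeWhile (· = 'a')
  p ++ 'S' :: p.map (fun _ => 'b') ++ ['$'] <+: input_string.toList ++ ['$']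

instance (input_string : String) : Decidable (D_ll1_parse input_string) := by
  unfold D_ll1_parse; infer_instance

def Spec_ll1_parse (input_string : String) (out : Bool) : Prop :=
  ¬ D_ll1_parse input_string → out = ll1_parse_alt input_string
instance (input_string : String) (out : Bool) : Decidable (Spec_ll1_parse input_string out) := by
  unfold Spec_ll1_parse; infer_instance

def pvDiffWitness_ll1_parse : String := "S"
def pvDiffWitnessOut_ll1_parse : Bool × Bool := (true, false)

-- ===== CLAIM (what is proved, stated in full; the proofs are below) =====
def Claim_unchanged_ll1_parse : Prop := ∀ (input_string : String), Dom_ll1_parse input_string → Spec_ll1_parse input_string (ll1_parse input_string)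
def Claim_changed_ll1_parse : Prop := Dom_ll1_parse (pvDiffWitness_ll1_parse) ∧ D_ll1_parse (pvDiffWitness_ll1_parse) ∧ ll1_parse (pvDiffWitness_ll1_parse) = pvDiffWitnessOut_ll1_parse.1 ∧ ll1_parse_alt (pvDiffWitness_ll1_parse) = pvDiffWitnessOut_ll1_parse.2 ∧ pvDiffWitnessOut_ll1_parse.1 ≠ pvDiffWitnessOut_ll1_parse.2
def Claim_exact_ll1_parse : Prop := ∀ (input_string : String), Dom_ll1_parse input_string → D_ll1_parse input_string → ll1_parse input_string ≠ ll1_parse_alt input_string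

-- ===== LEMMAS AND PROOFS =====

-- proof helper: non-accumulator leading-'a' count, and its link to leadAux
def leadA : List Char → Nat
  | [] => 0
  | c :: r => if c = 'a' then leadA r + 1 else 0

theorem takeWhile_a_eq : ∀ l : List Char, l.takeWhile (· = 'a') = List.replicate (leadA l) 'a'
  | [] => by simp [leadA]
  | c :: r => by
    rw [List.takeWhile_cons, leadA]
    by_cases hc : c = 'a'
    · rw [if_pos (by simpa using hc), if_pos hc, List.replicate_succ, takeWhile_a_eq r, hc]
    · rw [if_neg (by simpa using hc), if_neg hc, List.replicate_zero]

theorem D_unfold (t : String) :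
    D_ll1_parse t ↔ List.replicate (leadA t.toList) 'a' ++ 'S' ::
      List.replicate (leadA t.toList) 'b' ++ ['$'] <+: t.toList ++ ['$'] := by
  unfold D_ll1_parse
  simp only [takeWhile_a_eq, List.map_replicate]

-- altCount computes i plus the number of leading 'a's of the suffix from i
theorem altCount_eq_leadA (s : List Char) (i : Nat) : altCount s i = i + leadA (s.drop i) := by
  by_cases h : i < s.length
  · rw [altCount, dif_pos h, List.drop_eq_getElem_cons h, leadA]
    by_cases ha : s[i] = 'a'
    · rw [if_pos ha, if_pos ha, altCount_eq_leadA s (i + 1)]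
      omega
    · rw [if_neg ha, if_neg ha]
      omega
  · rw [altCount, dif_neg h, List.drop_eq_nil_of_le (Nat.le_of_not_lt h), leadA]
    omega
termination_by s.length - i

theorem leadA_append_dollar (l : List Char) : leadA (l ++ ['$']) = leadA l := by
  induction l with
  | nil => simp [leadA]
  | cons c r ih => simp [leadA, ih]

theorem leadA_le (l : List Char) : leadA l ≤ l.length := by
  induction l with
  | nil => simp [leadA]
  | cons c r ih =>
    rw [leadA]
    split
    · simpa using ih
    · simp

theorem leadA_drop_zero {s : List Char} {i : Nat} (h : leadA (s.drop i) = 0) :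
    s.getD i '#' ≠ 'a' := by
  by_cases hl : i < s.length
  · rw [List.getD_eq_getElem s '#' hl]
    intro hga
    rw [List.drop_eq_getElem_cons hl, leadA, if_pos hga] at h
    omega
  · rw [List.getD_eq_default s '#' (Nat.le_of_not_lt hl)]
    decide

theorem leadA_drop_succ {s : List Char} {i n : Nat} (h : leadA (s.drop i) = n + 1) :
    s.getD i '#' = 'a' ∧ leadA (s.drop (i + 1)) = n := by
  by_cases hl : i < s.length
  · rw [List.drop_eq_getElem_cons hl, leadA] at h
    by_cases hga : s[i] = 'a'
    · rw [if_pos hga] at h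
      exact ⟨by rw [List.getD_eq_getElem s '#' hl]; exact hga, by omega⟩
    · rw [if_neg hga] at h; omega
  · rw [List.drop_eq_nil_of_le (Nat.le_of_not_lt hl)] at h
    simp [leadA] at h

theorem getD_lt_leadA : ∀ (l : List Char) (j : Nat) (d : Char), j < leadA l → l.getD j d = 'a'
  | [], j, d, h => by simp [leadA] at h
  | c :: r, j, d, h => by
    rw [leadA] at h
    by_cases hc : c = 'a'
    · rw [if_pos hc] at h
      cases j with
      | zero => simpa using hc
      | succ j => exact getD_lt_leadA r j d (by omega)
    · rw [if_neg hc] at h; omega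

theorem leadA_eq_of : ∀ (n : Nat) (l : List Char),
    (∀ j < n, l.getD j '#' = 'a') → l.getD n '#' ≠ 'a' → leadA l = n
  | 0, [], _, _ => by simp [leadA]
  | 0, c :: r, _, hne => by
    rw [leadA, if_neg (by simpa using hne)]
  | n + 1, l, hall, hne => by
    have h0 := hall 0 (by omega)
    match l with
    | [] => simp at h0
    | c :: r =>
      rw [List.getD_cons_zero] at h0
      rw [leadA, if_pos h0]
      rw [leadA_eq_of n r (fun j hj => hall (j + 1) (by omega)) hne]

theorem pattern_getD (n j : Nat) (tail : List Char) :
    (List.replicate n 'a' ++ 'S' :: List.replicate n 'b' ++ '$' :: tail).getD j '#' =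
      if j < n then 'a' else if j = n then 'S' else if j < 2 * n + 1 then 'b' else
      if j = 2 * n + 1 then '$' else tail.getD (j - 2 * n - 2) '#' := by
  by_cases h3 : j < 2 * n + 1
  · rw [List.getD_append _ _ _ _ (by simp; omega)]
    by_cases h1 : j < n
    · rw [List.getD_append _ _ _ _ (by simp; omega), if_pos h1,
          List.getD_eq_getElem _ _ (by simpa using h1)]
      simp
    · rw [List.getD_append_right _ _ _ _ (by simp; omega), List.length_replicate]
      by_cases h2 : j = n
      · rw [if_neg (by omega), if_pos h2, show j - n = 0 by omega, List.getD_cons_zero]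
      · rw [show j - n = (j - n - 1) + 1 by omega, List.getD_cons_succ,
            List.getD_eq_getElem _ _ (by simp; omega), if_neg h1, if_neg h2, if_pos h3]
        simp
  · rw [List.getD_append_right _ _ _ _ (by simp; omega),
        show (List.replicate n 'a' ++ 'S' :: List.replicate n 'b').length = 2 * n + 1 by simp; omega]
    by_cases h4 : j = 2 * n + 1
    · rw [show j - (2 * n + 1) = 0 by omega, List.getD_cons_zero,
          if_neg (by omega), if_neg (by omega), if_neg h3, if_pos h4]
    · rw [show j - (2 * n + 1) = (j - 2 * n - 2) + 1 by omega, List.getD_cons_succ,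
          if_neg (by omega), if_neg (by omega), if_neg h3, if_neg h4]

theorem D_iff (t : String) :
    D_ll1_parse t ↔
      ((t.toList ++ ['$']).getD (leadA t.toList) '#' = 'S'
        ∧ (∀ j < leadA t.toList, (t.toList ++ ['$']).getD (leadA t.toList + 1 + j) '#' = 'b')
        ∧ (t.toList ++ ['$']).getD (2 * leadA t.toList + 1) '#' = '$') := by
  constructor
  · intro hD
    obtain ⟨tail, htl⟩ := (D_unfold t).mp hD
    have hL : t.toList ++ ['$'] = List.replicate (leadA t.toList) 'a' ++ 'S' ::
        List.replicate (leadA t.toList) 'b' ++ '$' :: tail := by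
      rw [← htl]; simp
    refine ⟨?_, fun j hj => ?_, ?_⟩
    · rw [hL, pattern_getD, if_neg (by omega), if_pos rfl]
    · rw [hL, pattern_getD, if_neg (by omega), if_neg (by omega), if_pos (by omega)]
    · rw [hL, pattern_getD, if_neg (by omega), if_neg (by omega), if_neg (by omega), if_pos rfl]
  · rintro ⟨hS, hb, hd⟩
    rw [D_unfold]
    have hlen : 2 * leadA t.toList + 1 < (t.toList ++ ['$']).length := by
      by_contra hcon
      rw [List.getD_eq_default _ _ (by omega)] at hd
      exact absurd hd (by decide)
    rw [List.prefix_iff_eq_take]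
    apply List.ext_getElem
    · rw [List.length_take, Nat.min_eq_left]
      simp only [List.length_append, List.length_cons, List.length_replicate,
        List.length_nil] at hlen ⊢
      omega
    · intro i h1 h2
      have hi : i < 2 * leadA t.toList + 2 := by
        have h1' := h1
        simp only [List.length_append, List.length_cons, List.length_replicate,
          List.length_nil] at h1'
        omega
      have hiL : i < (t.toList ++ ['$']).length := by omega
      rw [List.getElem_take, ← List.getD_eq_getElem _ '#' hiL,
          ← List.getD_eq_getElem _ ('#') h1]
      rw [show (List.replicate (leadA t.toList) 'a' ++ 'S' :: List.replicate (leadA t.toList) 'b' ++ ['$'])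
            = List.replicate (leadA t.toList) 'a' ++ 'S' :: List.replicate (leadA t.toList) 'b' ++ '$' :: ([] : List Char) from rfl,
          pattern_getD]
      by_cases c1 : i < leadA t.toList
      · rw [if_pos c1]
        exact (getD_lt_leadA _ i '#' (by rw [leadA_append_dollar]; omega)).symm
      · rw [if_neg c1]
        by_cases c2 : i = leadA t.toList
        · rw [if_pos c2, c2]
          exact hS.symm
        · rw [if_neg c2]
          by_cases c3 : i < 2 * leadA t.toList + 1
          · rw [if_pos c3]
            have := hb (i - leadA t.toList - 1) (by omega)
            rw [show leadA t.toList + 1 + (i - leadA t.toList - 1) = i by omega] at this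
            exact this.symm
          · rw [if_neg c3, if_pos (by omega), show i = 2 * leadA t.toList + 1 by omega]
            exact hd.symm

theorem altB_true_iff (s : List Char) (k i : Nat) :
    altB s i k = true ↔ (∀ j < k, s.getD (i + j) '#' = 'b') ∧ s.getD (i + k) '#' = '$' := by
  induction k generalizing i with
  | zero =>
    rw [altB]
    constructor
    · intro h
      exact ⟨fun j hj => absurd hj (by omega), by rw [Nat.add_zero]; exact beq_iff_eq.mp h⟩
    · rintro ⟨-, h⟩
      rw [Nat.add_zero] at h
      exact beq_iff_eq.mpr h
  | succ k ih =>
    rw [altB]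
    by_cases hb : s.getD i '#' = 'b'
    · rw [if_pos (beq_iff_eq.mpr hb), ih (i + 1)]
      constructor
      · rintro ⟨h1, h2⟩
        refine ⟨fun j hj => ?_, ?_⟩
        · cases j with
          | zero => rw [Nat.add_zero]; exact hb
          | succ j =>
            have := h1 j (by omega)
            rwa [show i + 1 + j = i + (j + 1) by omega] at this
        · rwa [show i + 1 + k = i + (k + 1) by omega] at h2
      · rintro ⟨h1, h2⟩
        refine ⟨fun j hj => ?_, ?_⟩
        · have := h1 (j + 1) (by omega)
          rwa [show i + (j + 1) = i + 1 + j by omega] at this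
        · rwa [show i + (k + 1) = i + 1 + k by omega] at h2
    · rw [if_neg (by simp only [beq_iff_eq]; exact hb)]
      constructor
      · intro h; simp at h
      · rintro ⟨h1, -⟩
        have := h1 0 (by omega)
        rw [Nat.add_zero] at this
        exact absurd this hb

theorem altB_false_of_S {s : List Char} {i : Nat} (k : Nat) (h : s.getD i '#' = 'S') :
    altB s i k = false := by
  cases k with
  | zero =>
    rw [altB]
    exact beq_eq_false_iff_ne.mpr (by rw [h]; decide)
  | succ k =>
    rw [altB, if_neg (by simp only [beq_iff_eq]; rw [h]; decide)]

-- phase 2 of A: a stack of k 'b's over '$' checks k 'b's and then '$'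
theorem loopA_bstack (s : List Char) (k : Nat) :
    ∀ i f, k + 2 ≤ f → loopA f s (List.replicate k 'b' ++ ['$']) i = altB s i k := by
  induction k with
  | zero =>
    intro i f hf
    match f, hf with
    | f + 1, hf =>
      simp only [List.replicate, List.nil_append, loopA]
      by_cases h : s.getD i '#' = '$'
      · rw [if_pos (show (('$' : Char) == s.getD i '#') = true by rw [h]; decide)]
        match f, (by omega : 1 ≤ f) with
        | f + 1, _ =>
          simp only [loopA, altB]
          rw [h]
          decide
      · rw [if_neg (by simp only [beq_iff_eq]; exact fun he => h he.symm),
            if_neg (by rw [show (('$' : Char) == 'S') = false by decide, Bool.false_and]; decide)]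
        rw [altB]
        exact (beq_eq_false_iff_ne.mpr h).symm
  | succ k ih =>
    intro i f hf
    match f, hf with
    | f + 1, hf =>
      rw [List.replicate_succ, List.cons_append]
      simp only [loopA]
      by_cases h : s.getD i '#' = 'b'
      · rw [if_pos (show (('b' : Char) == s.getD i '#') = true by rw [h]; decide),
            ih (i + 1) f (by omega), altB, if_pos (beq_iff_eq.mpr h)]
      · rw [if_neg (by simp only [beq_iff_eq]; exact fun he => h he.symm),
            if_neg (by rw [show (('b' : Char) == 'S') = false by decide, Bool.false_and]; decide),
            altB, if_neg (by simp only [beq_iff_eq]; exact h)]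

-- phase 1 of A: an 'S' over k 'b's over '$', with n leading 'a's ahead in the input
theorem loopA_Sstack (s : List Char) (n : Nat) :
    ∀ i k f, leadA (s.drop i) = n → 3 * n + k + 3 ≤ f →
      loopA f s ('S' :: (List.replicate k 'b' ++ ['$'])) i =
        if s.getD (i + n) '#' = 'S' then altB s (i + n + 1) (k + n) else altB s (i + n) (k + n) := by
  induction n with
  | zero =>
    intro i k f hc hf
    have hna := leadA_drop_zero hc
    match f, hf with
    | f + 1, hf =>
      simp only [Nat.add_zero, loopA]
      by_cases hS : s.getD i '#' = 'S'
      · rw [if_pos (show (('S' : Char) == s.getD i '#') = true by rw [hS]; decide),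
            if_pos hS, loopA_bstack s k (i + 1) f (by omega)]
      · rw [if_neg (by simp only [beq_iff_eq]; exact fun he => hS he.symm), if_neg hS]
        by_cases hb : s.getD i '#' = 'b'
        · rw [if_pos (by rw [hb]; decide), if_neg (by rw [hb]; decide),
              loopA_bstack s k i f (by omega)]
        · by_cases hd : s.getD i '#' = '$'
          · rw [if_pos (by rw [hd]; decide), if_neg (by rw [hd]; decide),
                loopA_bstack s k i f (by omega)]
          · rw [if_neg (by
                intro hcond
                simp only [Bool.and_eq_true, Bool.or_eq_true, beq_iff_eq] at hcond
                rcases hcond with ⟨-, (h | h) | h⟩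
                exacts [hna h, hb h, hd h])]
            cases k with
            | zero =>
              rw [altB]
              exact (beq_eq_false_iff_ne.mpr hd).symm
            | succ k =>
              rw [altB, if_neg (by simp only [beq_iff_eq]; exact hb)]
  | succ n ih =>
    intro i k f hc hf
    obtain ⟨hga, hc'⟩ := leadA_drop_succ hc
    match f, hf with
    | f + 1, hf =>
      simp only [loopA]
      rw [if_neg (by rw [hga]; decide), if_pos (by rw [hga]; decide),
          if_pos (by rw [hga]; decide)]
      match f, (by omega : 3 * n + (k + 1) + 3 + 1 ≤ f + 1) with
      | f + 1, hf' =>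
        simp only [loopA]
        rw [if_pos (by rw [hga]; decide)]
        rw [show ('S' :: 'b' :: (List.replicate k 'b' ++ ['$']))
              = 'S' :: (List.replicate (k + 1) 'b' ++ ['$']) by rw [List.replicate_succ]; rfl]
        rw [ih (i + 1) (k + 1) f hc' (by omega)]
        rw [show i + 1 + n = i + (n + 1) by omega,
            show k + 1 + n = k + (n + 1) by omega]

-- A's top-level characterisation: n leading 'a's, then either the 'S'-match branch or the plain b-run check
theorem ll1_parse_char (t : String) :
    ll1_parse t =
      (if (t.toList ++ ['$']).getD (leadA t.toList) '#' = 'S'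
       then altB (t.toList ++ ['$']) (leadA t.toList + 1) (leadA t.toList)
       else altB (t.toList ++ ['$']) (leadA t.toList) (leadA t.toList)) := by
  show loopA _ _ ['S', '$'] 0 = _
  have hn : leadA ((t.toList ++ ['$']).drop 0) = leadA t.toList := by
    rw [List.drop_zero, leadA_append_dollar]
  have hfuel : 3 * leadA t.toList + 0 + 3 ≤ 3 * (t.toList ++ ['$']).length + 3 := by
    have h1 := leadA_le t.toList
    have h2 : (t.toList ++ ['$']).length = t.toList.length + 1 := by simp
    omega
  rw [show (['S', '$'] : List Char) = 'S' :: (List.replicate 0 'b' ++ ['$']) from rfl]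
  rw [loopA_Sstack (t.toList ++ ['$']) (leadA t.toList) 0 0 _ hn hfuel]
  simp only [Nat.zero_add]

-- B's top-level characterisation
theorem ll1_parse_alt_char (t : String) :
    ll1_parse_alt t = altB (t.toList ++ ['$']) (leadA t.toList) (leadA t.toList) := by
  show altB _ (altCount _ 0) (altCount _ 0) = _
  rw [altCount_eq_leadA, List.drop_zero, leadA_append_dollar, Nat.zero_add]

theorem ll1_parse_spec' (t : String) (hD : ¬ D_ll1_parse t) :
    ll1_parse t = ll1_parse_alt t := by
  rw [ll1_parse_char, ll1_parse_alt_char]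
  by_cases hS : (t.toList ++ ['$']).getD (leadA t.toList) '#' = 'S'
  · rw [if_pos hS, altB_false_of_S (leadA t.toList) hS]
    have hD' := fun h => hD ((D_iff t).mpr h)
    by_cases hA : altB (t.toList ++ ['$']) (leadA t.toList + 1) (leadA t.toList) = true
    · exfalso
      obtain ⟨h1, h2⟩ := (altB_true_iff _ _ _).mp hA
      exact hD' ⟨hS, h1, by
        rw [show 2 * leadA t.toList + 1 = leadA t.toList + 1 + leadA t.toList by omega]
        exact h2⟩
    · simpa using hA
  · rw [if_neg hS]

theorem ll1_parse_tight' (t : String) (hD : D_ll1_parse t) :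
    ll1_parse t ≠ ll1_parse_alt t := by
  obtain ⟨hS, hb, hd⟩ := (D_iff t).mp hD
  rw [ll1_parse_char, ll1_parse_alt_char, if_pos hS, altB_false_of_S (leadA t.toList) hS]
  have hA : altB (t.toList ++ ['$']) (leadA t.toList + 1) (leadA t.toList) = true := by
    rw [altB_true_iff]
    exact ⟨hb, by
      rw [show leadA t.toList + 1 + leadA t.toList = 2 * leadA t.toList + 1 by omega]
      exact hd⟩
  rw [hA]
  decide

-- ===== VERDICT (by name: the statement is the Claim_ definition above) =====
theorem ll1_parse_spec : Claim_unchanged_ll1_parse := by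
  intro t _ hD
  exact ll1_parse_spec' t hD

theorem ll1_parse_changed : Claim_changed_ll1_parse := by
  unfold Claim_changed_ll1_parse
  refine ⟨by decide, by decide, by decide, ?_, by decide⟩
  rw [ll1_parse_alt_char]
  decide

theorem ll1_parse_tight : Claim_exact_ll1_parse := by
  intro t _ hD
  exact ll1_parse_tight' t hD
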